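-- pv_equiv track=rewrite | github.com/MrBrantCode/unitest_baseline | mut_generate/mist_train_taco/taco_14680/solution.py | generate_skiponacci_sequence
-- ===== SOURCE A (Python) =====
-- def generate_skiponacci_sequence(n: int) -> str:
--     if n < 1 or n > 64:
--         raise ValueError("n must be a positive integer between 1 and 64")
--
--     if n == 1:
--         return "1"
--
--     sequence = ["1"]
--     num = 1
--     prv = 0
--
--     for i in range(1, n):
--         new = num + prv
--         prv = num
--         num = new
--         if i % 2 == 0:
--             sequence.append(str(num))
--         else:
--             sequence.append("skip")
--
--     return ' '.join(sequence)
-- ===== SOURCE B (Python) =====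
-- def generate_skiponacci_sequence(n: int) -> str:
--     if n < 1 or n > 64:
--         raise ValueError("n must be a positive integer between 1 and 64")
--     if n == 1:
--         return "1"
--
--     def fib_pair(k):
--         # fast doubling: returns (F(k), F(k+1)) with F(0)=0, F(1)=1
--         if k == 0:
--             return (0, 1)
--         a, b = fib_pair(k // 2)
--         c = a * (2 * b - a)
--         d = a * a + b * b
--         if k % 2 == 0:
--             return (c, d)
--         return (d, c + d)
--
--     def token(i):
--         if i == 0:
--             return "1"
--         if i % 2 == 1:
--             return "skip"
--         return str(fib_pair(i + 1)[0])
--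
--     return ' '.join(token(i) for i in range(n))
-- ===== Notes on version B (the rewrite author's own statement) =====
-- stated objective: alternative
-- what changed: B computes each emitted Fibonacci value independently with the recursive fast-doubling identities (F(2m)=F(m)(2F(m+1)-F(m)), F(2m+1)=F(m)^2+F(m+1)^2) and maps indices to tokens, instead of A's single loop that carries the (num, prv) Fibonacci accumulator across iterations.
import Mathlib
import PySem

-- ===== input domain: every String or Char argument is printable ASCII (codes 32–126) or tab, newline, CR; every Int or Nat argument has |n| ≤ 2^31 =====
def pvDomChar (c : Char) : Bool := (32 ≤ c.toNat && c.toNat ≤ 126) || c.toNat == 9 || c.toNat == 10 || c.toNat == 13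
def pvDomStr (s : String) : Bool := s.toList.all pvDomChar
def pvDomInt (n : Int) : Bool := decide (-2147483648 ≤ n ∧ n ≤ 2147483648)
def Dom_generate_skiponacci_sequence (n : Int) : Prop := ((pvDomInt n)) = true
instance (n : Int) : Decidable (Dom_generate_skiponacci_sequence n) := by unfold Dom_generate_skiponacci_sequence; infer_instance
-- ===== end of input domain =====

-- B computes each emitted Fibonacci value independently by recursive fast doubling
-- instead of A's single loop carrying the (num, prv) accumulator (alternative algorithm).

-- ===== PORT A =====
-- A's loop body (one step of its interleaved loop)
def pvStepA (st : List String × Int × Int) (i : Int) : List String × Int × Int :=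
  let sequence := st.1
  let num := st.2.1
  let prv := st.2.2
  let new := num + prv
  let prv := num
  let num := new
  if PySem.Int.mod i 2 = 0 then (sequence ++ [PySem.Int.toStr num], num, prv)
  else (sequence ++ ["skip"], num, prv)

-- A raises ValueError for n < 1 or n > 64; those inputs are excluded by Pre_ (the
-- port returns "" there, a value the claim never touches).
def generate_skiponacci_sequence (n : Int) : String :=
  if n < 1 ∨ n > 64 then ""
  else if n = 1 then "1"
  else
    let st := (PySem.List.pyRange 1 n 1).foldl pvStepA (["1"], 1, 0)
    PySem.Str.join " " st.1

-- ===== PORT B =====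
-- Source B's fib_pair: fast doubling, (F(k), F(k+1)) with F(0)=0, F(1)=1.
-- Source B calls it on the nonnegative int i+1; ported on Nat (exact for k ≥ 0).
def pvFibPair (k : Nat) : Int × Int :=
  if h : k = 0 then (0, 1)
  else
    let p := pvFibPair (k / 2)
    let a := p.1
    let b := p.2
    let c := a * (2 * b - a)
    let d := a * a + b * b
    if k % 2 = 0 then (c, d) else (d, c + d)
termination_by k
decreasing_by exact Nat.div_lt_self (Nat.pos_of_ne_zero h) (by omega)

-- Source B's token(i)
def pvToken (i : Int) : String :=
  if i = 0 then "1"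
  else if PySem.Int.mod i 2 = 1 then "skip"
  else PySem.Int.toStr (pvFibPair (i + 1).toNat).1

def generate_skiponacci_sequence_alt (n : Int) : String :=
  if n < 1 ∨ n > 64 then ""
  else if n = 1 then "1"
  else PySem.Str.join " " ((PySem.List.pyRange 0 n 1).map pvToken)

-- ===== PRECONDITION & SPEC =====
-- Pre_ excludes exactly the inputs on which A raises ValueError (n < 1 or n > 64).
def Pre_generate_skiponacci_sequence (n : Int) : Prop := 1 ≤ n ∧ n ≤ 64
instance (n : Int) : Decidable (Pre_generate_skiponacci_sequence n) := by
  unfold Pre_generate_skiponacci_sequence; infer_instance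

def pvWitness_generate_skiponacci_sequence : Int := 7

def Spec_generate_skiponacci_sequence (n : Int) (out : String) : Prop :=
  out = generate_skiponacci_sequence_alt n
instance (n : Int) (out : String) : Decidable (Spec_generate_skiponacci_sequence n out) := by
  unfold Spec_generate_skiponacci_sequence; infer_instance

-- ===== CLAIM (what is proved, stated in full; the proofs are below) =====
def Claim_equal_generate_skiponacci_sequence : Prop :=
  ∀ (n : Int), Dom_generate_skiponacci_sequence n → Pre_generate_skiponacci_sequence n →
    Spec_generate_skiponacci_sequence n (generate_skiponacci_sequence n)

-- ===== LEMMAS AND PROOFS =====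

-- the common token at position j (0 = "1", odd = "skip", even = Fibonacci number)
def pvTok (j : Nat) : String :=
  if j = 0 then "1"
  else if j % 2 = 1 then "skip"
  else PySem.Int.toStr (Nat.fib (j + 1) : Int)

-- invariant of A's loop: after range(1, t+1) the sequence is the first t+1 tokens
-- and (num, prv) = (fib (t+1), fib t)
theorem pvA_inv (t : Nat) :
    (PySem.List.pyRange 1 ((t : Int) + 1) 1).foldl pvStepA (["1"], 1, 0) =
      ((List.range (t + 1)).map pvTok, (Nat.fib (t + 1) : Int), (Nat.fib t : Int)) := by
  induction t with
  | zero => simp [PySem.List.pyRange_one_eq_nil, pvTok]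
  | succ t ih =>
      have hr : PySem.List.pyRange 1 ((t : Int) + 1 + 1) 1 =
          PySem.List.pyRange 1 ((t : Int) + 1) 1 ++ [(t : Int) + 1] := by
        have := PySem.List.pyRange_one_succ_right (a := 1) (b := (t : Int) + 1) (by omega)
        simpa using this
      rw [show ((t + 1 : Nat) : Int) + 1 = ((t : Int) + 1) + 1 by push_cast; ring]
      rw [hr, List.foldl_append, ih]
      have hcast : ((t : Int) + 1) = ((t + 1 : Nat) : Int) := by push_cast; ring
      have hmod : PySem.Int.mod ((t : Int) + 1) 2 = (((t + 1) % 2 : Nat) : Int) := by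
        rw [hcast]; exact_mod_cast PySem.Int.mod_natCast (t + 1) 2
      simp only [List.foldl_cons, List.foldl_nil, pvStepA, hmod]
      rw [List.range_succ (n := t + 1), List.map_append]
      have hnew : (Nat.fib (t+1) : Int) + (Nat.fib t : Int) = (Nat.fib (t+2) : Int) := by
        push_cast [Nat.fib_add_two]; ring
      rcases Nat.even_or_odd (t + 1) with h | h
      · have h2 : (t + 1) % 2 = 0 := Nat.even_iff.mp h
        simp [pvTok, h2, hnew]
      · have h2 : (t + 1) % 2 = 1 := Nat.odd_iff.mp h
        simp [pvTok, h2, hnew]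

-- fast doubling is correct: pvFibPair k = (F(k), F(k+1))
theorem pvFibPair_eq (k : Nat) :
    pvFibPair k = ((Nat.fib k : Int), (Nat.fib (k + 1) : Int)) := by
  induction k using Nat.strong_induction_on with
  | _ k ih =>
    by_cases h0 : k = 0
    · subst h0; simp [pvFibPair]
    · rw [pvFibPair, dif_neg h0]
      have hlt : k / 2 < k := Nat.div_lt_self (Nat.pos_of_ne_zero h0) (by omega)
      rw [ih (k / 2) hlt]
      set m := k / 2 with hm
      have hc : (Nat.fib m : Int) * (2 * (Nat.fib (m + 1) : Int) - (Nat.fib m : Int)) =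
          (Nat.fib (2 * m) : Int) := by
        have hle : Nat.fib m ≤ 2 * Nat.fib (m + 1) := by
          have := Nat.fib_le_fib_succ (n := m); omega
        rw [Nat.fib_two_mul]
        push_cast [Nat.cast_sub hle]
        ring
      have hd : (Nat.fib m : Int) * (Nat.fib m : Int) +
          (Nat.fib (m + 1) : Int) * (Nat.fib (m + 1) : Int) = (Nat.fib (2 * m + 1) : Int) := by
        rw [Nat.fib_two_mul_add_one]
        push_cast
        ring
      rcases Nat.even_or_odd k with h | h
      · have h2 : k % 2 = 0 := Nat.even_iff.mp h
        have hk : k = 2 * m := by omega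
        simp only [if_pos h2]
        rw [hc, hd, ← hk]
      · have h2 : k % 2 = 1 := Nat.odd_iff.mp h
        have hk : k = 2 * m + 1 := by omega
        simp only [h2, if_neg (by omega : ¬ (1 : Nat) = 0)]
        rw [hc, hd]
        have hsum : (Nat.fib (2 * m) : Int) + (Nat.fib (2 * m + 1) : Int) =
            (Nat.fib (2 * m + 2) : Int) := by
          push_cast [Nat.fib_add_two]; ring
        rw [hsum, ← hk]
        have : 2 * m + 2 = k + 1 := by omega
        rw [this]

-- Source B's token at a natural index equals the common token
theorem pvToken_eq (j : Nat) : pvToken (j : Int) = pvTok j := by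
  unfold pvToken pvTok
  have hmod : PySem.Int.mod (j : Int) 2 = ((j % 2 : Nat) : Int) := by
    exact_mod_cast PySem.Int.mod_natCast j 2
  have htn : ((j : Int) + 1).toNat = j + 1 := by omega
  rw [hmod, htn, pvFibPair_eq]
  by_cases h0 : j = 0
  · simp [h0]
  · rw [if_neg (by exact_mod_cast h0), if_neg h0]
    rcases Nat.even_or_odd j with h | h
    · have h2 : j % 2 = 0 := Nat.even_iff.mp h
      simp [h2]
    · have h2 : j % 2 = 1 := Nat.odd_iff.mp h
      simp [h2]

-- ===== VERDICT (by name: the statement is the Claim_ definition above) =====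
theorem generate_skiponacci_sequence_spec : Claim_equal_generate_skiponacci_sequence := by
  intro n _ hpre
  obtain ⟨hlo, hhi⟩ := hpre
  unfold Spec_generate_skiponacci_sequence generate_skiponacci_sequence
    generate_skiponacci_sequence_alt
  by_cases hg : n < 1 ∨ n > 64
  · simp only [if_pos hg]
  · simp only [if_neg hg]
    by_cases hone : n = 1
    · simp only [if_pos hone]
    · simp only [if_neg hone]
      obtain ⟨s, hs⟩ : ∃ s : Nat, n = (s : Int) + 2 := ⟨(n - 2).toNat, by omega⟩
      subst hs
      have hA := pvA_inv (s + 1)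
      rw [show ((s + 1 : Nat) : Int) + 1 = (s : Int) + 2 by push_cast; ring] at hA
      simp only [hA]
      have htok : (PySem.List.pyRange 0 ((s : Int) + 2) 1).map pvToken =
          (List.range (s + 2)).map pvTok := by
        rw [show ((s : Int) + 2) = ((s + 2 : Nat) : Int) by push_cast; ring]
        rw [PySem.List.pyRange_zero_natCast (s + 2), List.map_map]
        refine List.map_congr_left ?_
        intro j hj
        exact pvToken_eq j
      rw [htok]
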